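-- pv_equiv track=rewrite | github.com/brendanxwhitaker/telephone | telephone/utils.py | compute_vocab_map
-- ===== SOURCE A (Python) =====
-- from typing import List, Set, Dict, Tuple
--
-- def compute_vocab_map(
--     vocabulary: Set[str], letter_map: Dict[str, str]
-- ) -> Dict[str, List[str]]:
--     """
--     Computes hashes of each word in ``vocabulary`` and maps the hashes to equivalence
--     classes of words under the hashing function given by ``letter_map``.
--
--     Parameters
--     ----------
--     vocabulary : ``Set[str]``.
--         A set of strings consisting of lowercase alpha characters only. All nonempty.
--     letter_map : ``Dict[str, str]``.
--         Mapping from uppercase letters to digits.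
--
--     Returns
--     -------
--     vocab_map : ``Dict[str, List[str]]``.
--         A mapping from sequences of numerals to words in a vocabulary which map to them
--         under ``letter_map`` which maps letters to numbers not necessarily injectively.
--     """
--     # Construct vocab_map.
--     vocab_map: Dict[str, List[str]] = {}
--     for token in vocabulary:
--         uppercased_token = token.upper()
--         tokenhash = "".join([letter_map[char] for char in uppercased_token])
--         if tokenhash in vocab_map:
--             vocab_map[tokenhash].append(uppercased_token)
--         else:
--             vocab_map[tokenhash] = [uppercased_token]
--
--     return vocab_map
-- ===== SOURCE B (Python) =====
-- def compute_vocab_map(vocabulary, letter_map):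
--     # Build (hash, uppercased token) pairs once, dedup hashes in first-occurrence
--     # order, then collect each class with a per-hash filter pass.
--     pairs = [
--         ("".join([letter_map[char] for char in token.upper()]), token.upper())
--         for token in vocabulary
--     ]
--     keys = []
--     for h, _ in pairs:
--         if h not in keys:
--             keys.append(h)
--     return {h: [u for h2, u in pairs if h2 == h] for h in keys}
-- ===== Notes on version B (the rewrite author's own statement) =====
-- stated objective: alternative
-- what changed: Replaces A's single-pass dict aggregation (lookup-then-append per word) with building all (hash, uppercased-word) pairs once, deduplicating hashes in first-occurrence order, and collecting each class by a per-hash filter pass.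
import Mathlib
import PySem

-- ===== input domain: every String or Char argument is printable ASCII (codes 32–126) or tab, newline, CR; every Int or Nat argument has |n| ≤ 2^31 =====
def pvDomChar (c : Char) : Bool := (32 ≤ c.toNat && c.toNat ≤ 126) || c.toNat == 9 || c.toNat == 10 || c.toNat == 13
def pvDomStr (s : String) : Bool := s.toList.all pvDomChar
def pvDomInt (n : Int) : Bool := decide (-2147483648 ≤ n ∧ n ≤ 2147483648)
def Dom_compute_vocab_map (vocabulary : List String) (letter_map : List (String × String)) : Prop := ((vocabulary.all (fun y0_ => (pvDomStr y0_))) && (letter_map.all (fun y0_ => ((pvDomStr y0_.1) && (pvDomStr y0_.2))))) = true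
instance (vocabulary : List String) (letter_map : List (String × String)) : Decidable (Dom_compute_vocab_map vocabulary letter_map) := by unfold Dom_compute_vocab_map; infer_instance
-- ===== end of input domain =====

-- B replaces A's single-pass dict aggregation by: build (hash, uppercased token)
-- pairs once, dedup hashes in first-occurrence order, then one filter pass per hash
-- (objective: alternative decomposition, not faster).

-- ===== PORT A =====
-- tokenhash = "".join([letter_map[char] for char in uppercased_token]); exact where
-- every character is a key of letter_map (Pre_); missing keys (Python KeyError) are
-- modelled by getD "" and excluded by Pre_.
def pvHash (letter_map : List (String × String)) (u : String) : String :=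
  PySem.Str.join "" (u.toList.map (fun c => (PySem.Dict.mk letter_map).getD (String.ofList [c]) ""))

def compute_vocab_map (vocabulary : List String) (letter_map : List (String × String)) : List (String × List String) :=
  (vocabulary.foldl
    (fun vocab_map token =>
      let uppercased_token := PySem.Str.upper token
      let tokenhash := pvHash letter_map uppercased_token
      match vocab_map.get? tokenhash with
      | some l => vocab_map.insert tokenhash (l ++ [uppercased_token])
      | none   => vocab_map.insert tokenhash [uppercased_token])
    PySem.Dict.empty).items

-- ===== PORT B =====
def compute_vocab_map_alt (vocabulary : List String) (letter_map : List (String × String)) : List (String × List String) :=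
  let pairs := vocabulary.map (fun token => (pvHash letter_map (PySem.Str.upper token), PySem.Str.upper token))
  let keys := pairs.foldl (fun ks p => if p.1 ∈ ks then ks else ks ++ [p.1]) []
  keys.map (fun h => (h, (pairs.filter (fun p => p.1 == h)).map (·.2)))

-- ===== PRECONDITION & SPEC =====
-- Pre_ excludes exactly the inputs where Python A raises KeyError: some character of
-- some uppercased token is not a key of letter_map.
def Pre_compute_vocab_map (vocabulary : List String) (letter_map : List (String × String)) : Prop :=
  (vocabulary.all (fun t => t.toList.all
    (fun c => (letter_map.map Prod.fst).contains (String.ofList [PySem.Chars.upperChar c])))) = true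
instance (vocabulary : List String) (letter_map : List (String × String)) : Decidable (Pre_compute_vocab_map vocabulary letter_map) := by unfold Pre_compute_vocab_map; infer_instance

def pvWitness_compute_vocab_map : List String × (List (String × String)) :=
  (["ab", "ba", "c"], [("A", "1"), ("B", "1"), ("C", "2")])

def Spec_compute_vocab_map (vocabulary : List String) (letter_map : List (String × String)) (out : List (String × List String)) : Prop := out = compute_vocab_map_alt vocabulary letter_map
instance (vocabulary : List String) (letter_map : List (String × String)) (out : List (String × List String)) : Decidable (Spec_compute_vocab_map vocabulary letter_map out) := by unfold Spec_compute_vocab_map; infer_instance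

-- ===== CLAIM (what is proved, stated in full; the proofs are below) =====
def Claim_equal_compute_vocab_map : Prop := ∀ (vocabulary : List String) (letter_map : List (String × String)), Dom_compute_vocab_map vocabulary letter_map → Pre_compute_vocab_map vocabulary letter_map → Spec_compute_vocab_map vocabulary letter_map (compute_vocab_map vocabulary letter_map)

-- ===== LEMMAS AND PROOFS =====

-- A's if-present-append-else-singleton step is Dict.modify with default [].
theorem stepA_eq_modify (d : PySem.Dict String (List String)) (h : String) (u : String) :
    (match d.get? h with
      | some l => d.insert h (l ++ [u])
      | none   => d.insert h [u]) = d.modify h [] (· ++ [u]) := by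
  cases hg : d.get? h <;>
    simp [PySem.Dict.modify, PySem.Dict.getD_eq_get?_getD, hg]

theorem compute_vocab_map_eq_grouped (vocabulary : List String) (letter_map : List (String × String)) :
    compute_vocab_map vocabulary letter_map = compute_vocab_map_alt vocabulary letter_map := by
  unfold compute_vocab_map compute_vocab_map_alt
  set ps := vocabulary.map (fun token => (pvHash letter_map (PySem.Str.upper token), PySem.Str.upper token)) with hps
  have hfold :
      (vocabulary.foldl
        (fun vocab_map token =>
          let uppercased_token := PySem.Str.upper token
          let tokenhash := pvHash letter_map uppercased_token
          match vocab_map.get? tokenhash with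
          | some l => vocab_map.insert tokenhash (l ++ [uppercased_token])
          | none   => vocab_map.insert tokenhash [uppercased_token])
        PySem.Dict.empty)
      = ps.foldl (fun d p => d.modify p.1 [] (· ++ [p.2])) PySem.Dict.empty := by
    rw [hps, List.foldl_map]
    have hfun : (fun (vocab_map : PySem.Dict String (List String)) (token : String) =>
        let uppercased_token := PySem.Str.upper token
        let tokenhash := pvHash letter_map uppercased_token
        match vocab_map.get? tokenhash with
        | some l => vocab_map.insert tokenhash (l ++ [uppercased_token])
        | none   => vocab_map.insert tokenhash [uppercased_token])
        = fun d token => d.modify (pvHash letter_map (PySem.Str.upper token)) [] (· ++ [PySem.Str.upper token]) :=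
      funext fun d => funext fun t => stepA_eq_modify d _ _
    rw [hfun]
  rw [hfold]
  set D := ps.foldl (fun d p => d.modify p.1 [] (· ++ [p.2])) PySem.Dict.empty with hD
  have hnd : D.keys.Nodup := by
    rw [hD]
    exact PySem.Dict.nodup_keys_foldl_modify_key ps Prod.fst [] (fun d x => (· ++ [x.2]))
      PySem.Dict.empty PySem.Dict.nodup_keys_empty
  have hkeys : D.keys = ps.foldl (fun ks p => if p.1 ∈ ks then ks else ks ++ [p.1]) [] := by
    rw [hD, PySem.Dict.keys_foldl_modify_key ps Prod.fst [] (fun d x => (· ++ [x.2])) PySem.Dict.empty]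
    rw [PySem.Dict.keys_empty, PySem.Set.update_nil_left, PySem.Set.ofList_eq_foldl, List.foldl_map]
    have hadd : (fun (s : List String) (p : String × String) => PySem.Set.add s p.1)
        = fun ks p => if p.1 ∈ ks then ks else ks ++ [p.1] :=
      funext fun s => funext fun p => PySem.Set.add_eq_ite s p.1
    rw [hadd]
  have hitems : D.items = D.keys.map (fun k => (k, D.getD k [])) :=
    PySem.Dict.items_eq_map_keys D hnd []
  rw [hitems, hkeys]
  apply List.map_congr_left
  intro h _
  have : D.getD h [] = (ps.filter (fun p => p.1 == h)).map (·.2) := by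
    rw [hD, PySem.Dict.getD_foldl_modify_append]
    simp [PySem.Dict.getD_empty]
  rw [this]

-- ===== VERDICT (by name: the statement is the Claim_ definition above) =====
theorem compute_vocab_map_spec : Claim_equal_compute_vocab_map := by
  intro voc lm _ _
  unfold Spec_compute_vocab_map
  exact compute_vocab_map_eq_grouped voc lm
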